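-- pv_equiv track=rewrite | github.com/MoseleyBioinformaticsLab/isoenum | isoenum/__main__.py | _remove_new_line_from_usage_patterns
-- ===== SOURCE A (Python) =====
-- def _remove_new_line_from_usage_patterns(docstr):
--     """Removes new line from usage patterns in docopt CLI description.
--     :param str docstr: docopt CLI description.
--     :return: Reformatted docstring ready for docopt consumption.
--     :rtype: :py:class:`str`
--     """
--     lines = []
--
--     usage = False
--     for line in docstr.split("\n"):
--         if line.startswith("Usage:"):
--             usage = True
--         elif line.startswith("Options:"):
--             lines.append("")
--             usage = False
--
--         if usage:
--             if not line:
--                 continue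
--             else:
--                 lines.append(line)
--         else:
--             lines.append(line)
--
--     return "\n".join(lines)
-- ===== SOURCE B (Python) =====
-- def _remove_new_line_from_usage_patterns(docstr):
--     """Region-based reformatting: usage regions are emitted with blank lines
--     dropped, 'Options:' lines get a blank line before them, the rest is copied."""
--     lines = docstr.split("\n")
--     n = len(lines)
--     out = []
--     i = 0
--     while i < n:
--         line = lines[i]
--         if line.startswith("Usage:"):
--             j = i + 1
--             while j < n and not lines[j].startswith("Options:"):
--                 j += 1
--             out.extend(l for l in lines[i:j] if l)
--             i = j
--         elif line.startswith("Options:"):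
--             out.append("")
--             out.append(line)
--             i += 1
--         else:
--             out.append(line)
--             i += 1
--     return "\n".join(out)
-- ===== Notes on version B (the rewrite author's own statement) =====
-- stated objective: alternative
-- what changed: Replaces the boolean usage-flag threaded through one loop by a region partition: on a 'Usage:' line the whole region up to the next 'Options:' line is scanned, filtered of blank lines and emitted at once; other lines are handled case by case.
import Mathlib
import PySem

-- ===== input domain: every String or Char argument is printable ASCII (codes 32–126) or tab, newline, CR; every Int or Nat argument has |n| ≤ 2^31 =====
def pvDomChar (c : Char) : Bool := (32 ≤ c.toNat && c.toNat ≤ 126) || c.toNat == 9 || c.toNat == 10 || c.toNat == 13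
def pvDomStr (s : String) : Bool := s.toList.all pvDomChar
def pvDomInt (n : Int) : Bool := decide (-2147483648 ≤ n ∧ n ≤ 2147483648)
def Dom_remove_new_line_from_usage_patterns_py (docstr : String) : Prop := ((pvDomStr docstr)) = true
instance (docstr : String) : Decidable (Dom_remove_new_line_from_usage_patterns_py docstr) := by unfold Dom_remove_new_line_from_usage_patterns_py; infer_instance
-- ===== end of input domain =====

-- B replaces A's running usage flag by a region partition (same cost, different decomposition).

-- ===== PORT A =====
-- one iteration of A's for-loop: state = (usage flag, accumulated lines)
def pvStepA (st : Bool × List String) (line : String) : Bool × List String :=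
  let p : Bool × List String :=
    if PySem.Str.startswith line "Usage:" then (true, st.2)
    else if PySem.Str.startswith line "Options:" then (false, st.2 ++ [""])
    else (st.1, st.2)
  if p.1 then (if line = "" then p else (p.1, p.2 ++ [line]))
  else (p.1, p.2 ++ [line])

def remove_new_line_from_usage_patterns_py (docstr : String) : String :=
  PySem.Str.join "\n" (((PySem.Str.split? docstr "\n").getD []).foldl pvStepA (false, [])).2

-- ===== PORT B =====
-- Source B's outer while-loop as structural recursion; the inner j-scan is the
-- takeWhile/dropWhile split of the remaining lines at the next "Options:" line.
def pvNotOpt (l : String) : Bool := !PySem.Str.startswith l "Options:"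

def pvAltGo : List String → List String
  | [] => []
  | line :: rest =>
    if PySem.Str.startswith line "Usage:" then
      (line :: rest.takeWhile pvNotOpt).filter (fun l => l != "")
        ++ pvAltGo (rest.dropWhile pvNotOpt)
    else if PySem.Str.startswith line "Options:" then
      "" :: line :: pvAltGo rest
    else line :: pvAltGo rest
termination_by ls => ls.length
decreasing_by
  · have := List.length_dropWhile_le pvNotOpt rest; simp; omega
  · simp
  · simp

def remove_new_line_from_usage_patterns_py_alt (docstr : String) : String :=
  PySem.Str.join "\n" (pvAltGo ((PySem.Str.split? docstr "\n").getD []))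

-- ===== PRECONDITION & SPEC =====
def Spec_remove_new_line_from_usage_patterns_py (docstr : String) (out : String) : Prop := out = remove_new_line_from_usage_patterns_py_alt docstr
instance (docstr : String) (out : String) : Decidable (Spec_remove_new_line_from_usage_patterns_py docstr out) := by unfold Spec_remove_new_line_from_usage_patterns_py; infer_instance

-- ===== CLAIM (what is proved, stated in full; the proofs are below) =====
def Claim_equal_remove_new_line_from_usage_patterns_py : Prop := ∀ (docstr : String), Dom_remove_new_line_from_usage_patterns_py docstr → Spec_remove_new_line_from_usage_patterns_py docstr (remove_new_line_from_usage_patterns_py docstr)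

-- ===== LEMMAS AND PROOFS =====

-- A's loop, rephrased as the list of lines still to be appended from a given flag
def pvGoA : Bool → List String → List String
  | _, [] => []
  | usage, l :: rest =>
    if PySem.Str.startswith l "Usage:" then
      (if l = "" then [] else [l]) ++ pvGoA true rest
    else if PySem.Str.startswith l "Options:" then
      "" :: l :: pvGoA false rest
    else if usage then (if l = "" then [] else [l]) ++ pvGoA usage rest
    else l :: pvGoA usage rest

theorem pv_usage_ne_empty {l : String} (h : PySem.Str.startswith l "Usage:" = true) :
    l ≠ "" := by
  intro hl; subst hl; exact absurd h (by decide)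

theorem pv_usage_not_opt {l : String} (h : PySem.Str.startswith l "Usage:" = true) :
    PySem.Str.startswith l "Options:" = false := by
  by_contra ho
  rw [Bool.not_eq_false] at ho
  simp only [PySem.Str.startswith_eq, PySem.Chars.startswith_iff] at h ho
  obtain ⟨t, ht⟩ := h
  rw [← ht] at ho
  simp [List.prefix_cons_iff] at ho

theorem pv_sw_nil_usage : PySem.Chars.startswith ([] : List Char) ['U','s','a','g','e',':'] = false := by decide

theorem pv_sw_nil_opt : PySem.Chars.startswith ([] : List Char) ['O','p','t','i','o','n','s',':'] = false := by decide

theorem pv_foldA (ls : List String) : ∀ (u : Bool) (acc : List String),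
    (ls.foldl pvStepA (u, acc)).2 = acc ++ pvGoA u ls := by
  induction ls with
  | nil => intro u acc; simp [pvGoA]
  | cons l rest ih =>
    intro u acc
    simp only [List.foldl_cons]
    by_cases hU : PySem.Str.startswith l "Usage:" = true
    · have hne := pv_usage_ne_empty hU
      have hU' := hU; simp at hU'
      simp [pvStepA, pvGoA, hU', hne, ih]
    · have hU' := hU; simp at hU'
      by_cases hO : PySem.Str.startswith l "Options:" = true
      · have hO' := hO; simp at hO'
        simp [pvStepA, pvGoA, hU', hO', ih]
      · have hO' := hO; simp at hO'
        by_cases hu : u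
        · by_cases hl : l = "" <;>
            simp [pvStepA, pvGoA, hU', hO', hu, hl, ih, pv_sw_nil_usage, pv_sw_nil_opt]
        · simp [pvStepA, pvGoA, hU', hO', hu, ih]

theorem pv_goA_true (ls : List String) :
    pvGoA true ls = (ls.takeWhile pvNotOpt).filter (fun l => l != "")
      ++ pvGoA false (ls.dropWhile pvNotOpt) := by
  induction ls with
  | nil => simp [pvGoA]
  | cons l rest ih =>
    by_cases hO : PySem.Str.startswith l "Options:" = true
    · have hU : PySem.Str.startswith l "Usage:" = false := by
        by_contra h; rw [Bool.not_eq_false] at h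
        rw [pv_usage_not_opt h] at hO; simp at hO
      have hO' := hO; simp at hO'
      have hU' := hU; simp at hU'
      simp [pvGoA, pvNotOpt, hU', hO']
    · have hO' := hO; simp at hO'
      by_cases hU : PySem.Str.startswith l "Usage:" = true
      · have hne := pv_usage_ne_empty hU
        have hU' := hU; simp at hU'
        simp [pvGoA, pvNotOpt, hU', hO', hne, ih]
      · have hU' := hU; simp at hU'
        by_cases hl : l = "" <;>
          simp [pvGoA, pvNotOpt, hU', hO', hl, ih, pv_sw_nil_usage, pv_sw_nil_opt]

theorem pv_goA_false (ls : List String) : pvGoA false ls = pvAltGo ls := by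
  induction ls using pvAltGo.induct with
  | case1 => simp [pvGoA, pvAltGo]
  | case2 line rest hU ih =>
    have hne := pv_usage_ne_empty hU
    have hU' := hU; simp at hU'
    rw [pvAltGo]
    simp [pvGoA, hU', hne, pv_goA_true, ih]
  | case3 line rest hU hO ih =>
    have hU' := hU; simp at hU'
    have hO' := hO; simp at hO'
    rw [pvAltGo]
    simp [pvGoA, hU', hO', ih]
  | case4 line rest hU hO ih =>
    have hU' := hU; simp at hU'
    have hO' := hO; simp at hO'
    rw [pvAltGo]
    simp [pvGoA, hU', hO', ih]

-- ===== VERDICT (by name: the statement is the Claim_ definition above) =====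
theorem remove_new_line_from_usage_patterns_py_spec : Claim_equal_remove_new_line_from_usage_patterns_py := by
  intro docstr _
  unfold Spec_remove_new_line_from_usage_patterns_py
  unfold remove_new_line_from_usage_patterns_py remove_new_line_from_usage_patterns_py_alt
  rw [pv_foldA, pv_goA_false]
  simp
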